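-- pv_equiv track=rewrite | github.com/itu-rover/rover_18 | navigation_test.py | to_lines
-- ===== SOURCE A (Python) =====
-- def to_lines(points):
--     v = []
--     for i in range(0, len(points)):
--         if i == 0:
--             v.append([[0, 0, 0], points[i]])
--         else:
--             v.append([points[i - 1], points[i]])
--     return v
-- ===== SOURCE B (Python) =====
-- def to_lines(points):
--     def walk(prev, rest):
--         if not rest:
--             return []
--         return [[prev, rest[0]]] + walk(rest[0], rest[1:])
--     return walk([0, 0, 0], points)
-- ===== Notes on version B (the rewrite author's own statement) =====
-- stated objective: alternative
-- what changed: Replaces A's indexed loop with an i==0 branch by a structural recursion that threads the previous point as an accumulator seeded with the origin, so no indexing and no special-case branch exist.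
import Mathlib
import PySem

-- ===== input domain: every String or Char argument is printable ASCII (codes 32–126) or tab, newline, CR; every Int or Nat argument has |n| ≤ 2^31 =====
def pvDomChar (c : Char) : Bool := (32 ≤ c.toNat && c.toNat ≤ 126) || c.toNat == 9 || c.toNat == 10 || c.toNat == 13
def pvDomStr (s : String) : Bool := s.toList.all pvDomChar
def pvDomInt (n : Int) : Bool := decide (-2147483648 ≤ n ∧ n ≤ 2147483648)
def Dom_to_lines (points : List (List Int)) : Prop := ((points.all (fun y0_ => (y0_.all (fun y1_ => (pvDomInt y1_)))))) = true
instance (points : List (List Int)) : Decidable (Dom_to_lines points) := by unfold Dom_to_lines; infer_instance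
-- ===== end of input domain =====

-- B replaces A's indexed loop with its i==0 branch by a structural recursion that
-- threads the previous point as an accumulator seeded with the origin (alternative decomposition).

-- ===== PORT A =====
def to_lines (points : List (List Int)) : List (List (List Int)) :=
  (PySem.List.pyRange 0 (PySem.List.len points) 1).foldl
    (fun v i =>
      if i == 0 then
        v ++ [[[0, 0, 0], PySem.List.pyGetD points i []]]
      else
        v ++ [[PySem.List.pyGetD points (i - 1) [], PySem.List.pyGetD points i []]]) []

-- ===== PORT B =====
def to_lines_walk (prev : List Int) (rest : List (List Int)) : List (List (List Int)) :=
  match rest with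
  | [] => []
  | p :: rs => [[prev, p]] ++ to_lines_walk p rs

def to_lines_alt (points : List (List Int)) : List (List (List Int)) :=
  to_lines_walk [0, 0, 0] points

-- ===== PRECONDITION & SPEC =====
def Spec_to_lines (points : List (List Int)) (out : List (List (List Int))) : Prop := out = to_lines_alt points
instance (points : List (List Int)) (out : List (List (List Int))) : Decidable (Spec_to_lines points out) := by unfold Spec_to_lines; infer_instance

-- ===== CLAIM (what is proved, stated in full; the proofs are below) =====
def Claim_equal_to_lines : Prop := ∀ (points : List (List Int)), Dom_to_lines points → Spec_to_lines points (to_lines points)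

-- ===== LEMMAS AND PROOFS =====

theorem to_lines_eq_map (points : List (List Int)) :
    to_lines points =
      (List.range points.length).map (fun (k : Nat) =>
        if (k : Int) == 0 then
          [[0, 0, 0], PySem.List.pyGetD points (k : Int) []]
        else
          [PySem.List.pyGetD points ((k : Int) - 1) [], PySem.List.pyGetD points (k : Int) []]) := by
  unfold to_lines
  rw [PySem.List.len_eq, PySem.List.pyRange_zero_natCast]
  rw [List.foldl_map]
  have hfun : (fun (v : List (List (List Int))) (k : Nat) =>
      if (k : Int) == 0 then
        v ++ [[[0, 0, 0], PySem.List.pyGetD points (k : Int) []]]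
      else
        v ++ [[PySem.List.pyGetD points ((k : Int) - 1) [], PySem.List.pyGetD points (k : Int) []]])
      = (fun (v : List (List (List Int))) (k : Nat) => v ++ [if (k : Int) == 0 then
          [[0, 0, 0], PySem.List.pyGetD points (k : Int) []]
        else
          [PySem.List.pyGetD points ((k : Int) - 1) [], PySem.List.pyGetD points (k : Int) []]]) := by
    funext v k; split_ifs <;> rfl
  rw [hfun, PySem.List.foldl_append_singleton_eq_map, List.nil_append]

theorem to_lines_walk_eq_zip (rest : List (List Int)) :
    ∀ (prev : List Int),
      to_lines_walk prev rest = ((prev :: rest.dropLast).zip rest).map (fun ab => [ab.1, ab.2]) := by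
  induction rest with
  | nil => intro prev; simp [to_lines_walk]
  | cons p rs ih =>
    intro prev
    cases rs with
    | nil => simp [to_lines_walk]
    | cons q qs =>
      show [[prev, p]] ++ to_lines_walk p (q :: qs) = _
      rw [ih p]
      simp [List.dropLast_cons_of_ne_nil (by simp : q :: qs ≠ []), List.zip]

-- ===== VERDICT (by name: the statement is the Claim_ definition above) =====
theorem to_lines_spec : Claim_equal_to_lines := by
  intro points _
  show to_lines points = to_lines_alt points
  rw [to_lines_eq_map]
  unfold to_lines_alt
  rw [to_lines_walk_eq_zip]
  apply List.ext_getElem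
  · simp [List.length_zip, List.length_dropLast]
    omega
  · intro k hk1 hk2
    simp only [List.length_map, List.length_range] at hk1
    simp only [List.getElem_map, List.getElem_range, List.getElem_zip]
    by_cases h : k = 0
    · subst h
      cases points with
      | nil => simp at hk1
      | cons p ps => simp [PySem.List.pyGetD_zero_cons]
    · have hk0 : 0 < k := Nat.pos_of_ne_zero h
      have : ((k : Int)) ≠ 0 := by exact_mod_cast h
      simp only [beq_iff_eq, this, if_false]
      have hcast : (k : Int) - 1 = ((k - 1 : Nat) : Int) := by omega
      rw [hcast]
      simp only [PySem.List.pyGetD_natCast]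
      have hd : k - 1 < points.dropLast.length := by
        simp [List.length_dropLast]; omega
      simp [List.getElem_cons, h, List.getElem_dropLast,
        List.getD, List.getElem?_eq_getElem hk1,
        List.getElem?_eq_getElem (by omega : k - 1 < points.length)]
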